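-- pv_equiv track=rewrite | github.com/NoraKyz/Code-PTIT-K5-Python | cung_hoang_dao.py | find_zodiac_sign
-- ===== SOURCE A (Python) =====
-- def find_zodiac_sign(day, month):
--     zodiac_signs = [
--         ("Bach Duong", [(3, 21), (4, 19)]),
--         ("Kim Nguu", [(4, 20), (5, 20)]),
--         ("Song Tu", [(5, 21), (6, 20)]),
--         ("Cu Giai", [(6, 21), (7, 22)]),
--         ("Su Tu", [(7, 23), (8, 22)]),
--         ("Xu Nu", [(8, 23), (9, 22)]),
--         ("Thien Binh", [(9, 23), (10, 22)]),
--         ("Thien Yet", [(10, 23), (11, 22)]),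
--         ("Nhan Ma", [(11, 23), (12, 21)]),
--         ("Ma Ket", [(12, 22), (1, 19)]),
--         ("Bao Binh", [(1, 20), (2, 18)]),
--         ("Song Ngu", [(2, 19), (3, 20)])
--     ]
--
--     for sign, (start_date, end_date) in zodiac_signs:
--         if (month == start_date[0] and day >= start_date[1]) or \
--            (month == end_date[0] and day <= end_date[1]):
--             return sign
--     return ""
-- ===== SOURCE B (Python) =====
-- _ZODIAC_TABLE = {
--     1: (20, "Ma Ket", "Bao Binh"),
--     2: (19, "Bao Binh", "Song Ngu"),
--     3: (21, "Song Ngu", "Bach Duong"),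
--     4: (20, "Bach Duong", "Kim Nguu"),
--     5: (21, "Kim Nguu", "Song Tu"),
--     6: (21, "Song Tu", "Cu Giai"),
--     7: (23, "Cu Giai", "Su Tu"),
--     8: (23, "Su Tu", "Xu Nu"),
--     9: (23, "Xu Nu", "Thien Binh"),
--     10: (23, "Thien Binh", "Thien Yet"),
--     11: (23, "Thien Yet", "Nhan Ma"),
--     12: (22, "Nhan Ma", "Ma Ket"),
-- }
--
-- def find_zodiac_sign(day, month):
--     entry = _ZODIAC_TABLE.get(month)
--     if entry is None:
--         return ""
--     cutoff, low, high = entry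
--     return low if day < cutoff else high
-- ===== Notes on version B (the rewrite author's own statement) =====
-- stated objective: idiomatic
-- what changed: Replaced the 12-iteration scan over sign ranges with a single dict lookup keyed by month, mapping each month to (cutoff_day, sign_before, sign_from_cutoff) and one day<cutoff comparison.
import Mathlib
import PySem

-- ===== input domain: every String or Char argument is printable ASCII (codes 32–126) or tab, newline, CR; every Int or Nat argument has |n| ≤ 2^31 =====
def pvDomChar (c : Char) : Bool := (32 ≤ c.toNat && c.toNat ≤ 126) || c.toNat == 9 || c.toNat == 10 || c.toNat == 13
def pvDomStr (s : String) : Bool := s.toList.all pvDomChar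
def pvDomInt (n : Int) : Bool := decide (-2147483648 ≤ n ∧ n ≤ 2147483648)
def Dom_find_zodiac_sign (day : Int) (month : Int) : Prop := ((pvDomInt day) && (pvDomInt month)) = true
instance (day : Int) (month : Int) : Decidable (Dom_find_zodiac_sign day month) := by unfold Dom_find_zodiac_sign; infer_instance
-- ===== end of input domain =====

-- B replaces A's 12-entry scan by one month-keyed dict lookup plus a single day<cutoff comparison (idiomatic).

-- ===== PORT A =====
-- the for-loop with early return, as structural recursion over the same literal list
def pvZodiacLoop (day month : Int) : List (String × ((Int × Int) × (Int × Int))) → String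
  | [] => ""
  | (sign, (start_date, end_date)) :: rest =>
      if (month = start_date.1 ∧ day ≥ start_date.2) ∨ (month = end_date.1 ∧ day ≤ end_date.2)
      then sign else pvZodiacLoop day month rest

def find_zodiac_sign (day : Int) (month : Int) : String :=
  pvZodiacLoop day month
    [ ("Bach Duong", ((3, 21), (4, 19)))
    , ("Kim Nguu",   ((4, 20), (5, 20)))
    , ("Song Tu",    ((5, 21), (6, 20)))
    , ("Cu Giai",    ((6, 21), (7, 22)))
    , ("Su Tu",      ((7, 23), (8, 22)))
    , ("Xu Nu",      ((8, 23), (9, 22)))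
    , ("Thien Binh", ((9, 23), (10, 22)))
    , ("Thien Yet",  ((10, 23), (11, 22)))
    , ("Nhan Ma",    ((11, 23), (12, 21)))
    , ("Ma Ket",     ((12, 22), (1, 19)))
    , ("Bao Binh",   ((1, 20), (2, 18)))
    , ("Song Ngu",   ((2, 19), (3, 20))) ]

-- ===== PORT B =====
def pvZodiacTable : PySem.Dict Int (Int × String × String) :=
  PySem.Dict.mk [ (1, (20, "Ma Ket", "Bao Binh"))
  , (2, (19, "Bao Binh", "Song Ngu"))
  , (3, (21, "Song Ngu", "Bach Duong"))
  , (4, (20, "Bach Duong", "Kim Nguu"))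
  , (5, (21, "Kim Nguu", "Song Tu"))
  , (6, (21, "Song Tu", "Cu Giai"))
  , (7, (23, "Cu Giai", "Su Tu"))
  , (8, (23, "Su Tu", "Xu Nu"))
  , (9, (23, "Xu Nu", "Thien Binh"))
  , (10, (23, "Thien Binh", "Thien Yet"))
  , (11, (23, "Thien Yet", "Nhan Ma"))
  , (12, (22, "Nhan Ma", "Ma Ket")) ]

def find_zodiac_sign_alt (day : Int) (month : Int) : String :=
  match PySem.Dict.get? pvZodiacTable month with
  | none => ""
  | some (cutoff, low, high) => if day < cutoff then low else high

-- ===== PRECONDITION & SPEC =====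
def Spec_find_zodiac_sign (day : Int) (month : Int) (out : String) : Prop := out = find_zodiac_sign_alt day month
instance (day : Int) (month : Int) (out : String) : Decidable (Spec_find_zodiac_sign day month out) := by unfold Spec_find_zodiac_sign; infer_instance

-- ===== CLAIM (what is proved, stated in full; the proofs are below) =====
def Claim_equal_find_zodiac_sign : Prop := ∀ (day : Int) (month : Int), Dom_find_zodiac_sign day month → Spec_find_zodiac_sign day month (find_zodiac_sign day month)

-- ===== LEMMAS AND PROOFS =====

theorem pv_m1 (day : Int) : find_zodiac_sign day 1 = find_zodiac_sign_alt day 1 := by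
  have hb : PySem.Dict.get? pvZodiacTable 1 = some (20, "Ma Ket", "Bao Binh") := by decide
  simp only [find_zodiac_sign, find_zodiac_sign_alt, hb, pvZodiacLoop]
  norm_num
  split_ifs <;> first | rfl | omega

theorem pv_m2 (day : Int) : find_zodiac_sign day 2 = find_zodiac_sign_alt day 2 := by
  have hb : PySem.Dict.get? pvZodiacTable 2 = some (19, "Bao Binh", "Song Ngu") := by decide
  simp only [find_zodiac_sign, find_zodiac_sign_alt, hb, pvZodiacLoop]
  norm_num
  split_ifs <;> first | rfl | omega

theorem pv_m3 (day : Int) : find_zodiac_sign day 3 = find_zodiac_sign_alt day 3 := by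
  have hb : PySem.Dict.get? pvZodiacTable 3 = some (21, "Song Ngu", "Bach Duong") := by decide
  simp only [find_zodiac_sign, find_zodiac_sign_alt, hb, pvZodiacLoop]
  norm_num
  split_ifs <;> first | rfl | omega

theorem pv_m4 (day : Int) : find_zodiac_sign day 4 = find_zodiac_sign_alt day 4 := by
  have hb : PySem.Dict.get? pvZodiacTable 4 = some (20, "Bach Duong", "Kim Nguu") := by decide
  simp only [find_zodiac_sign, find_zodiac_sign_alt, hb, pvZodiacLoop]
  norm_num
  split_ifs <;> first | rfl | omega

theorem pv_m5 (day : Int) : find_zodiac_sign day 5 = find_zodiac_sign_alt day 5 := by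
  have hb : PySem.Dict.get? pvZodiacTable 5 = some (21, "Kim Nguu", "Song Tu") := by decide
  simp only [find_zodiac_sign, find_zodiac_sign_alt, hb, pvZodiacLoop]
  norm_num
  split_ifs <;> first | rfl | omega

theorem pv_m6 (day : Int) : find_zodiac_sign day 6 = find_zodiac_sign_alt day 6 := by
  have hb : PySem.Dict.get? pvZodiacTable 6 = some (21, "Song Tu", "Cu Giai") := by decide
  simp only [find_zodiac_sign, find_zodiac_sign_alt, hb, pvZodiacLoop]
  norm_num
  split_ifs <;> first | rfl | omega

theorem pv_m7 (day : Int) : find_zodiac_sign day 7 = find_zodiac_sign_alt day 7 := by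
  have hb : PySem.Dict.get? pvZodiacTable 7 = some (23, "Cu Giai", "Su Tu") := by decide
  simp only [find_zodiac_sign, find_zodiac_sign_alt, hb, pvZodiacLoop]
  norm_num
  split_ifs <;> first | rfl | omega

theorem pv_m8 (day : Int) : find_zodiac_sign day 8 = find_zodiac_sign_alt day 8 := by
  have hb : PySem.Dict.get? pvZodiacTable 8 = some (23, "Su Tu", "Xu Nu") := by decide
  simp only [find_zodiac_sign, find_zodiac_sign_alt, hb, pvZodiacLoop]
  norm_num
  split_ifs <;> first | rfl | omega

theorem pv_m9 (day : Int) : find_zodiac_sign day 9 = find_zodiac_sign_alt day 9 := by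
  have hb : PySem.Dict.get? pvZodiacTable 9 = some (23, "Xu Nu", "Thien Binh") := by decide
  simp only [find_zodiac_sign, find_zodiac_sign_alt, hb, pvZodiacLoop]
  norm_num
  split_ifs <;> first | rfl | omega

theorem pv_m10 (day : Int) : find_zodiac_sign day 10 = find_zodiac_sign_alt day 10 := by
  have hb : PySem.Dict.get? pvZodiacTable 10 = some (23, "Thien Binh", "Thien Yet") := by decide
  simp only [find_zodiac_sign, find_zodiac_sign_alt, hb, pvZodiacLoop]
  norm_num
  split_ifs <;> first | rfl | omega

theorem pv_m11 (day : Int) : find_zodiac_sign day 11 = find_zodiac_sign_alt day 11 := by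
  have hb : PySem.Dict.get? pvZodiacTable 11 = some (23, "Thien Yet", "Nhan Ma") := by decide
  simp only [find_zodiac_sign, find_zodiac_sign_alt, hb, pvZodiacLoop]
  norm_num
  split_ifs <;> first | rfl | omega

theorem pv_m12 (day : Int) : find_zodiac_sign day 12 = find_zodiac_sign_alt day 12 := by
  have hb : PySem.Dict.get? pvZodiacTable 12 = some (22, "Nhan Ma", "Ma Ket") := by decide
  simp only [find_zodiac_sign, find_zodiac_sign_alt, hb, pvZodiacLoop]
  norm_num
  split_ifs <;> first | rfl | omega

theorem pvLoop_notmem (day month : Int) (l : List (String × ((Int × Int) × (Int × Int))))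
    (h : ∀ e ∈ l, ¬((month = e.2.1.1 ∧ day ≥ e.2.1.2) ∨ (month = e.2.2.1 ∧ day ≤ e.2.2.2))) :
    pvZodiacLoop day month l = "" := by
  induction l with
  | nil => rfl
  | cons e rest ih =>
      obtain ⟨sign, s, en⟩ := e
      rw [pvZodiacLoop, if_neg (h _ (List.mem_cons_self))]
      exact ih fun e' he' => h e' (List.mem_cons_of_mem _ he')

theorem pv_mout (day month : Int) (h : month < 1 ∨ 12 < month) :
    find_zodiac_sign day month = find_zodiac_sign_alt day month := by
  have hb : PySem.Dict.get? pvZodiacTable month = none := by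
    rw [PySem.Dict.get?_eq_none_iff_not_mem_keys]
    simp only [pvZodiacTable, PySem.Dict.keys_mk, List.map, List.mem_cons, List.not_mem_nil, or_false]
    omega
  simp only [find_zodiac_sign_alt, hb, find_zodiac_sign]
  apply pvLoop_notmem
  intro e he
  fin_cases he <;> simp <;> omega

theorem pvZodiac_eq (day month : Int) : find_zodiac_sign day month = find_zodiac_sign_alt day month := by
  rcases (show month = 1 ∨ month = 2 ∨ month = 3 ∨ month = 4 ∨ month = 5 ∨ month = 6 ∨
      month = 7 ∨ month = 8 ∨ month = 9 ∨ month = 10 ∨ month = 11 ∨ month = 12 ∨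
      (month < 1 ∨ 12 < month) by omega) with
    h | h | h | h | h | h | h | h | h | h | h | h | h
  all_goals first
  | (subst h
     first
     | exact pv_m1 day | exact pv_m2 day | exact pv_m3 day | exact pv_m4 day
     | exact pv_m5 day | exact pv_m6 day | exact pv_m7 day | exact pv_m8 day
     | exact pv_m9 day | exact pv_m10 day | exact pv_m11 day | exact pv_m12 day)
  | exact pv_mout day month h

-- ===== VERDICT (by name: the statement is the Claim_ definition above) =====
theorem find_zodiac_sign_spec : Claim_equal_find_zodiac_sign := by
  intro day month _
  exact pvZodiac_eq day month
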